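-- pv_equiv track=rewrite | github.com/LYMingML/video2text | src/utils/subtitle.py | _wrap_english_text
-- ===== SOURCE A (Python) =====
-- def _wrap_english_text(text: str, max_words: int = 20) -> str:
--     """英文/外文本按单词数换行，每行最多 max_words 个单词。"""
--     if not text:
--         return text
--     # 移除现有换行，重新按单词数换行
--     text = text.replace("\n", " ")
--     words = text.split()
--     lines = []
--     current_line_words = []
--     for word in words:
--         current_line_words.append(word)
--         if len(current_line_words) >= max_words:
--             lines.append(" ".join(current_line_words))
--             current_line_words = []
--     if current_line_words:
--         lines.append(" ".join(current_line_words))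
--     return "\n".join(lines)
-- ===== SOURCE B (Python) =====
-- def _wrap_english_text(text: str, max_words: int = 20) -> str:
--     """Wrap text by word count: chunk the word list by slicing instead of
--     counting words one by one."""
--     if not text:
--         return text
--     words = text.replace("\n", " ").split()
--     step = max_words if max_words > 0 else 1  # A emits one word per line when max_words <= 0
--     lines = []
--     while words:
--         lines.append(" ".join(words[:step]))
--         words = words[step:]
--     return "\n".join(lines)
-- ===== Notes on version B (the rewrite author's own statement) =====
-- stated objective: simpler
-- what changed: Replaces the per-word counter/accumulator loop with chunking the word list by slicing (words[:step] / words[step:]), with the non-positive max_words case normalized to step 1 up front.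
import Mathlib
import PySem

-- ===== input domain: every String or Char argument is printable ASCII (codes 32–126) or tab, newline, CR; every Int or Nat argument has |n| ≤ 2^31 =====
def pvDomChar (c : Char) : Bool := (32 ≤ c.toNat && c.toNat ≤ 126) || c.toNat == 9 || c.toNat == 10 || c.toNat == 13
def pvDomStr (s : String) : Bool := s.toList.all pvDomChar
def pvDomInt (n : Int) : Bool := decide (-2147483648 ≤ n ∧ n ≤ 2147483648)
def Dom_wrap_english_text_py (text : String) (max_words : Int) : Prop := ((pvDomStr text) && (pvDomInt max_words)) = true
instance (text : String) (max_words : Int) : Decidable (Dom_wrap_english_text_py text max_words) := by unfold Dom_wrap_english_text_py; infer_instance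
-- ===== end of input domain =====

-- B chunks the word list by slicing instead of counting words into an accumulator; objective: simpler.

-- ===== PORT A =====
def wrap_english_text_py (text : String) (max_words : Int) : String :=
  if text = "" then text
  else
    let words := PySem.Str.split₀ (PySem.Str.replace text "\n" " ")
    let st := words.foldl (fun (st : List String × List String) word =>
      let cur := st.2 ++ [word]
      if max_words ≤ (cur.length : Int) then (st.1 ++ [PySem.Str.join " " cur], [])
      else (st.1, cur)) (([], []) : List String × List String)
    let lines := if st.2 = [] then st.1 else st.1 ++ [PySem.Str.join " " st.2]
    PySem.Str.join "\n" lines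

-- ===== PORT B =====
def pvStepOf (max_words : Int) : Int := if 0 < max_words then max_words else 1

theorem pvStepOf_pos (max_words : Int) : 1 ≤ pvStepOf max_words := by
  unfold pvStepOf; split <;> omega

-- the 'while words:' loop of Source B
def pvWrapLoop (step : Int) (hstep : 1 ≤ step) (words lines : List String) : List String :=
  if h : words = [] then lines
  else pvWrapLoop step hstep (PySem.List.slice words (some step) none)
        (lines ++ [PySem.Str.join " " (PySem.List.slice words none (some step))])
termination_by words.length
decreasing_by
  rw [PySem.List.slice_from words (by omega : (0:Int) ≤ step)]
  have h1 : 1 ≤ step.toNat := by omega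
  have h2 : words.length ≠ 0 := fun hh => h (List.eq_nil_of_length_eq_zero hh)
  simp [List.length_drop]; omega

def wrap_english_text_py_alt (text : String) (max_words : Int) : String :=
  if text = "" then text
  else
    let words := PySem.Str.split₀ (PySem.Str.replace text "\n" " ")
    PySem.Str.join "\n" (pvWrapLoop (pvStepOf max_words) (pvStepOf_pos max_words) words [])

-- ===== PRECONDITION & SPEC =====
def Spec_wrap_english_text_py (text : String) (max_words : Int) (out : String) : Prop := out = wrap_english_text_py_alt text max_words
instance (text : String) (max_words : Int) (out : String) : Decidable (Spec_wrap_english_text_py text max_words out) := by unfold Spec_wrap_english_text_py; infer_instance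

-- ===== CLAIM (what is proved, stated in full; the proofs are below) =====
def Claim_equal_wrap_english_text_py : Prop := ∀ (text : String) (max_words : Int), Dom_wrap_english_text_py text max_words → Spec_wrap_english_text_py text max_words (wrap_english_text_py text max_words)

-- ===== LEMMAS AND PROOFS =====

-- chunks of size s+1
def pvChunks1 (s : Nat) (ws : List String) : List (List String) :=
  if h : ws = [] then [] else ws.take (s+1) :: pvChunks1 s (ws.drop (s+1))
termination_by ws.length
decreasing_by
  have : ws.length ≠ 0 := fun hh => h (List.eq_nil_of_length_eq_zero hh)
  simp [List.length_drop]; omega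

theorem pvWrapLoop_eq_chunks (step : Int) (h : 1 ≤ step) (ws lines : List String) :
    pvWrapLoop step h ws lines
      = lines ++ (pvChunks1 (step.toNat - 1) ws).map (PySem.Str.join " ") := by
  fun_induction pvWrapLoop step h ws lines with
  | case1 lines =>
      simp [pvChunks1]
  | case2 words lines hnil ih =>
      have hs : step.toNat - 1 + 1 = step.toNat := by omega
      rw [PySem.List.slice_from words (by omega : (0:Int) ≤ step),
          PySem.List.slice_to words (by omega : (0:Int) ≤ step)] at *
      have hR : pvChunks1 (step.toNat - 1) words
          = words.take step.toNat :: pvChunks1 (step.toNat - 1) (words.drop step.toNat) := by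
        rw [pvChunks1]; simp [hnil, hs]
      rw [ih, hR]
      simp

theorem pvFold_eq_chunks (mw : Int) (s : Nat)
    (hcond : ∀ n : Nat, 1 ≤ n → (mw ≤ (n : Int) ↔ s + 1 ≤ n)) :
    ∀ (ws lines cur : List String), cur.length ≤ s →
      (let st := ws.foldl (fun (st : List String × List String) word =>
        let c := st.2 ++ [word]
        if mw ≤ (c.length : Int) then (st.1 ++ [PySem.Str.join " " c], [])
        else (st.1, c)) (lines, cur);
       if st.2 = [] then st.1 else st.1 ++ [PySem.Str.join " " st.2])
      = lines ++ (pvChunks1 s (cur ++ ws)).map (PySem.Str.join " ") := by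
  intro ws
  induction ws with
  | nil =>
      intro lines cur hlen
      by_cases hc : cur = []
      · subst hc; rw [pvChunks1]; simp
      · rw [pvChunks1]; simp [hc]
        rw [pvChunks1]
        have h1 : cur.take (s+1) = cur := List.take_of_length_le (by omega)
        have h2 : cur.drop (s+1) = [] := List.drop_eq_nil_of_le (by omega)
        simp [h1, h2]
  | cons w rest ih =>
      intro lines cur hlen
      simp only [List.foldl_cons]
      have hl : (cur ++ [w]).length = cur.length + 1 := by simp
      by_cases hge : mw ≤ ((cur ++ [w]).length : Int)
      · have hiff := hcond (cur ++ [w]).length (by simp)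
        have hlen' : (cur ++ [w]).length = s + 1 := by omega
        simp only [hge, if_pos]
        have hih := ih (lines ++ [PySem.Str.join " " (cur ++ [w])]) [] (by simp)
        simp only [List.nil_append] at hih
        have hrw : cur ++ w :: rest = (cur ++ [w]) ++ rest := by simp
        have h1 : (cur ++ w :: rest).take (s+1) = cur ++ [w] := by
          rw [hrw, List.take_append_of_le_length (by omega)]
          exact List.take_of_length_le (by omega)
        have h2 : (cur ++ w :: rest).drop (s+1) = rest := by
          rw [hrw, ← hlen', List.drop_left]
        have hR : pvChunks1 s (cur ++ w :: rest) = (cur ++ [w]) :: pvChunks1 s rest := by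
          rw [pvChunks1]
          simp [h1, h2]
        rw [hih, hR]
        simp
      · have hiff := hcond (cur ++ [w]).length (by simp)
        have hlt : (cur ++ [w]).length ≤ s := by omega
        simp only [hge, if_false]
        have hih := ih lines (cur ++ [w]) hlt
        rw [hih]
        have hrw : (cur ++ [w]) ++ rest = cur ++ w :: rest := by simp
        rw [hrw]

-- ===== VERDICT (by name: the statement is the Claim_ definition above) =====
theorem wrap_english_text_py_spec : Claim_equal_wrap_english_text_py := by
  unfold Claim_equal_wrap_english_text_py
  intro text mw _
  unfold Spec_wrap_english_text_py wrap_english_text_py wrap_english_text_py_alt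
  by_cases ht : text = ""
  · simp [ht]
  · simp only [ht, if_false]
    set words := PySem.Str.split₀ (PySem.Str.replace text "\n" " ") with hwords
    have hstep := pvStepOf_pos mw
    have hcond : ∀ n : Nat, 1 ≤ n → (mw ≤ (n : Int) ↔ (pvStepOf mw).toNat - 1 + 1 ≤ n) := by
      intro n hn
      unfold pvStepOf
      split <;> omega
    have hA := pvFold_eq_chunks mw ((pvStepOf mw).toNat - 1) hcond words [] [] (by simp)
    simp only [List.nil_append] at hA
    rw [hA, pvWrapLoop_eq_chunks]
    simp
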